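-- pv_equiv track=rewrite | github.com/elenflores02/SP | python-scripts-train/addfeatures.py | hasrepconchar
-- ===== SOURCE A (Python) =====
-- def hasrepconchar( str ):
-- 	"returns true if str has repetitive consecutive characters"
-- 	if (len(str) == 1):
-- 		return False
--
-- 	charCount = 1
--
-- 	for index in range(len(str) - 1):
-- 	    c = str[index];
-- 	    if (c == str[index + 1]):
-- 	        charCount+=1;
--
-- 	        if (charCount >= 3):
-- 	            return True;
-- 	    else:
-- 	        charCount = 1;
--
-- 	return False
-- ===== SOURCE B (Python) =====
-- def hasrepconchar(str):
--     "returns true if str has repetitive consecutive characters"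
--     runs = []
--     i = 0
--     n = len(str)
--     while i < n:
--         j = i
--         while j < n and str[j] == str[i]:
--             j += 1
--         runs.append(j - i)
--         i = j
--     return any(r >= 3 for r in runs)
-- ===== Notes on version B (the rewrite author's own statement) =====
-- stated objective: alternative
-- what changed: B collapses the string into the list of maximal-run lengths (a two-level run scan) and then checks whether any run length is >= 3, instead of A's single pass with a reset-on-mismatch counter and early return.
import Mathlib
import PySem

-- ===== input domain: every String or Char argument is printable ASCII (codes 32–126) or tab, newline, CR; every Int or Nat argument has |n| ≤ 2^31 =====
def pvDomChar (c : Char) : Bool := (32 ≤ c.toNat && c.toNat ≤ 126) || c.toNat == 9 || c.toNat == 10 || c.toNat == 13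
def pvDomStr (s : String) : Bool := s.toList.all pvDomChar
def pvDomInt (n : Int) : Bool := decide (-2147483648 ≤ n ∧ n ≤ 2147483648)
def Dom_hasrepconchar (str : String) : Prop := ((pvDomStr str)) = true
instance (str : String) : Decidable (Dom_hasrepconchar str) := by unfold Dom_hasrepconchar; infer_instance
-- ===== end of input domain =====

-- B replaces A's reset-on-mismatch counter pass by collapsing the string into its
-- maximal-run lengths and checking whether any run has length ≥ 3 (objective: alternative).

-- ===== PORT A =====
-- the for-loop over index ∈ range(len-1): each step compares str[index] with str[index+1],
-- carrying charCount; early 'return True' when charCount reaches 3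
def pvLoopA : List Char → Nat → Bool
  | c :: d :: rest, count =>
    if c == d then
      if count + 1 ≥ 3 then true
      else pvLoopA (d :: rest) (count + 1)
    else pvLoopA (d :: rest) 1
  | _, _ => false

def hasrepconchar (str : String) : Bool :=
  if str.toList.length == 1 then false
  else pvLoopA str.toList 1

-- ===== PORT B =====
-- the outer while-loop of Source B: collect the length of each maximal run
-- (inner while loop = takeWhile/dropWhile of the run starting at i)
def pvRunLens : List Char → List Nat
  | [] => []
  | c :: cs =>
    (1 + (cs.takeWhile (· == c)).length) :: pvRunLens (cs.dropWhile (· == c))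
termination_by l => l.length
decreasing_by
  simp only [List.length_cons]
  exact Nat.lt_succ_of_le (List.length_dropWhile_le _ _)

def hasrepconchar_alt (str : String) : Bool :=
  (pvRunLens str.toList).any (fun r => decide (3 ≤ r))

-- ===== PRECONDITION & SPEC =====
def Spec_hasrepconchar (str : String) (out : Bool) : Prop := out = hasrepconchar_alt str
instance (str : String) (out : Bool) : Decidable (Spec_hasrepconchar str out) := by unfold Spec_hasrepconchar; infer_instance

-- ===== CLAIM (what is proved, stated in full; the proofs are below) =====
def Claim_equal_hasrepconchar : Prop := ∀ (str : String), Dom_hasrepconchar str → Spec_hasrepconchar str (hasrepconchar str)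

-- ===== LEMMAS AND PROOFS =====

-- head-run length and rest-after-head-run of a char list
def pvHeadLen : List Char → Nat
  | [] => 0
  | c :: cs => 1 + (cs.takeWhile (· == c)).length

def pvDropRun : List Char → List Char
  | [] => []
  | c :: cs => cs.dropWhile (· == c)

def pvHasRun (l : List Char) : Bool := (pvRunLens l).any (fun r => decide (3 ≤ r))

lemma pvHasRun_eq (l : List Char) :
    pvHasRun l = (decide (3 ≤ pvHeadLen l) || pvHasRun (pvDropRun l)) := by
  cases l with
  | nil => simp [pvHasRun, pvRunLens, pvHeadLen, pvDropRun]
  | cons c cs =>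
    simp only [pvHasRun, pvHeadLen, pvDropRun]
    rw [pvRunLens]
    simp only [List.any_cons]
    rfl

lemma pvLoopA_eq (l : List Char) (count : Nat) (h1 : 1 ≤ count) (h2 : count ≤ 2) :
    pvLoopA l count = (decide (3 ≤ pvHeadLen l + (count - 1)) || pvHasRun (pvDropRun l)) := by
  induction l generalizing count with
  | nil =>
    simp [pvLoopA, pvHeadLen, pvDropRun, pvHasRun, pvRunLens]
    omega
  | cons c cs ih =>
    cases cs with
    | nil =>
      simp [pvLoopA, pvHeadLen, pvDropRun, pvHasRun, pvRunLens]
      omega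
    | cons d t =>
      by_cases hcd : c = d
      · subst hcd
        have htw : (c :: t).takeWhile (· == c) = c :: t.takeWhile (· == c) := by
          simp [List.takeWhile]
        have hdw : (c :: t).dropWhile (· == c) = t.dropWhile (· == c) := by
          simp [List.dropWhile]
        by_cases h3 : count + 1 ≥ 3
        · -- count = 2, early return True
          have hc2 : count = 2 := by omega
          subst hc2
          have hlhs : pvLoopA (c :: c :: t) 2 = true := by simp [pvLoopA]
          have hhl : 3 ≤ pvHeadLen (c :: c :: t) + (2 - 1) := by
            simp only [pvHeadLen, htw, List.length_cons]
            omega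
          rw [hlhs]
          simp [hhl]
        · -- count = 1, recurse with count + 1 = 2
          have hc1 : count = 1 := by omega
          subst hc1
          have hlhs : pvLoopA (c :: c :: t) 1 = pvLoopA (c :: t) 2 := by
            simp [pvLoopA]
          rw [hlhs, ih 2 (by omega) (by omega)]
          have hdr : pvDropRun (c :: c :: t) = pvDropRun (c :: t) := by
            simp [pvDropRun, hdw]
          rw [hdr]
          congr 1
          simp only [decide_eq_decide, pvHeadLen, htw, List.length_cons]
          omega
      · -- mismatch: reset counter to 1
        have hne : (d == c) = false := by
          simp only [beq_eq_false_iff_ne, ne_eq]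
          exact fun h => hcd h.symm
        have htw : (d :: t).takeWhile (· == c) = [] := by
          simp [List.takeWhile, hne]
        have hdw : (d :: t).dropWhile (· == c) = d :: t := by
          simp [List.dropWhile, hne]
        have hne2 : (c == d) = false := by
          simp only [beq_eq_false_iff_ne, ne_eq]
          exact hcd
        have hlhs : pvLoopA (c :: d :: t) count = pvLoopA (d :: t) 1 := by
          simp [pvLoopA, hne2]
        rw [hlhs, ih 1 (by omega) (by omega)]
        simp only [Nat.sub_self, Nat.add_zero]
        rw [← pvHasRun_eq (d :: t)]
        have hhl : ¬ (3 ≤ pvHeadLen (c :: d :: t) + (count - 1)) := by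
          simp only [pvHeadLen, htw, List.length_nil]
          omega
        have hdr : pvDropRun (c :: d :: t) = d :: t := by
          simp [pvDropRun, hdw]
        simp [hhl, hdr]

lemma pvLoopA_one (l : List Char) : pvLoopA l 1 = pvHasRun l := by
  rw [pvLoopA_eq l 1 (by omega) (by omega), pvHasRun_eq l]
  norm_num

lemma pvHasRun_singleton (c : Char) : pvHasRun [c] = false := by
  simp [pvHasRun, pvRunLens]

-- ===== VERDICT (by name: the statement is the Claim_ definition above) =====
theorem hasrepconchar_spec : Claim_equal_hasrepconchar := by
  intro str _
  unfold Spec_hasrepconchar hasrepconchar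
  have halt : hasrepconchar_alt str = pvHasRun str.toList := rfl
  rw [halt]
  by_cases h1 : str.toList.length = 1
  · obtain ⟨c, hc⟩ : ∃ c, str.toList = [c] := by
      cases hl : str.toList with
      | nil => simp [hl] at h1
      | cons a u =>
        cases u with
        | nil => exact ⟨a, rfl⟩
        | cons b v => simp [hl] at h1
    rw [hc]
    simp [pvHasRun_singleton]
  · have hnot : ¬ ((str.toList.length == 1) = true) := by simpa using h1
    rw [if_neg hnot]
    exact pvLoopA_one _
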